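-- pv_equiv track=rewrite | github.com/kodjooo/sheets-to-wp | run/utils.py | normalize_category_pairs
-- ===== SOURCE A (Python) =====
-- def parse_subcategory_values(raw_value):
--     # Нормализуем список подкатегорий из строки/списка, разделитель — запятая.
--     if raw_value is None:
--         return []
--     if isinstance(raw_value, (list, tuple, set)):
--         values = []
--         for item in raw_value:
--             values.extend(parse_subcategory_values(item))
--         return [value for value in values if value]
--     if isinstance(raw_value, str):
--         parts = [part.strip() for part in raw_value.split(",")]
--         return [part for part in parts if part]
--     value = str(raw_value).strip()
--     return [value] if value else []
--
-- def normalize_category_pairs(raw_pairs):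
--     # Разворачиваем пары (CATEGORY, SUBCATEGORY), поддерживаем несколько подкатегорий через запятую.
--     normalized = []
--     seen = set()
--     for item in raw_pairs:
--         if not isinstance(item, (list, tuple)) or len(item) != 2:
--             continue
--         category_name, subcategory_name = item
--         if not category_name:
--             continue
--         subcategories = parse_subcategory_values(subcategory_name)
--         if subcategories:
--             for subcategory in subcategories:
--                 key = (category_name, subcategory)
--                 if key not in seen:
--                     normalized.append(key)
--                     seen.add(key)
--         else:
--             key = (category_name, None)
--             if key not in seen:
--                 normalized.append(key)
--                 seen.add(key)
--     return normalized
-- ===== SOURCE B (Python) =====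
-- def normalize_category_pairs(raw_pairs):
--     # Two-pass rewrite: first generate every candidate key in order,
--     # then deduplicate order-preservingly in one shot with dict.fromkeys.
--     keys = []
--     for item in raw_pairs:
--         if not isinstance(item, (list, tuple)) or len(item) != 2:
--             continue
--         category_name, subcategory_name = item
--         if not category_name:
--             continue
--         if subcategory_name is None:
--             subs = []
--         else:
--             subs = [p for p in (part.strip() for part in subcategory_name.split(",")) if p]
--         if subs:
--             keys.extend((category_name, s) for s in subs)
--         else:
--             keys.append((category_name, None))
--     return list(dict.fromkeys(keys))
-- ===== Notes on version B (the rewrite author's own statement) =====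
-- stated objective: simpler
-- what changed: Splits A's single loop with an interleaved seen-set/append dedup into two passes: a generation pass that appends every candidate key to a flat list (inlining the subcategory parse as a comprehension), followed by one order-preserving dedup via dict.fromkeys.
import Mathlib
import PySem

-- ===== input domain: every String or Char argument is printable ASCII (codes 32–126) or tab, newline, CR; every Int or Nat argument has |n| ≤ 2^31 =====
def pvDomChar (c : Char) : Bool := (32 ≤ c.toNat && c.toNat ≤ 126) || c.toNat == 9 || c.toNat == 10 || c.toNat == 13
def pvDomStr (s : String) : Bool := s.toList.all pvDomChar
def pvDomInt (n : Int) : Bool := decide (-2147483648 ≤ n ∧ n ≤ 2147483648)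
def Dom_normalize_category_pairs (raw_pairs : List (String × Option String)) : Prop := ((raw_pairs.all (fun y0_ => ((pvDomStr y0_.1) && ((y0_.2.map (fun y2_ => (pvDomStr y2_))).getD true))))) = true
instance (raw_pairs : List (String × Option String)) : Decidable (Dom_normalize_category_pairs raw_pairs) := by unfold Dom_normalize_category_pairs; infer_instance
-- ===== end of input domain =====

-- B replaces A's single loop with interleaved seen-set dedup by a generation pass plus one
-- order-preserving dedup (dict.fromkeys); objective: simpler.


-- ===== PORT A =====
-- parse_subcategory_values restricted to the values Optional[str] admits (None or a str):
-- None -> [], str -> strip each comma-separated part and keep the non-empty ones.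
def pvParseSubs (raw_value : Option String) : List String :=
  match raw_value with
  | none => []
  | some s => (((PySem.Str.split? s ",").getD []).map PySem.Str.strip).filter (fun p => p ≠ "")

-- `len(item) != 2` is always false for a typed pair; `not category_name` is `item.1 = ""`.
def normalize_category_pairs (raw_pairs : List (String × Option String)) : List (String × Option String) :=
  (raw_pairs.foldl
    (fun (st : List (String × Option String) × PySem.Set (String × Option String)) item =>
      if item.1 = "" then st
      else
        let subs := pvParseSubs item.2
        if subs ≠ [] then
          subs.foldl (fun st sub =>
            if PySem.Set.contains st.2 (item.1, some sub) then st
            else (st.1 ++ [(item.1, some sub)], PySem.Set.add st.2 (item.1, some sub))) st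
        else
          if PySem.Set.contains st.2 (item.1, none) then st
          else (st.1 ++ [(item.1, none)], PySem.Set.add st.2 (item.1, none)))
    ([], PySem.Set.empty)).1

-- ===== PORT B =====
def normalize_category_pairs_alt (raw_pairs : List (String × Option String)) : List (String × Option String) :=
  let keys := raw_pairs.foldl
    (fun (acc : List (String × Option String)) item =>
      if item.1 = "" then acc
      else
        let subs := match item.2 with
          | none => []
          | some s => (((PySem.Str.split? s ",").getD []).map PySem.Str.strip).filter (fun p => p ≠ "")
        if subs ≠ [] then acc ++ subs.map (fun s => (item.1, some s))
        else acc ++ [(item.1, none)]) []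
  PySem.List.dedup keys

-- ===== PRECONDITION & SPEC =====
def Spec_normalize_category_pairs (raw_pairs : List (String × Option String)) (out : List (String × Option String)) : Prop := out = normalize_category_pairs_alt raw_pairs
instance (raw_pairs : List (String × Option String)) (out : List (String × Option String)) : Decidable (Spec_normalize_category_pairs raw_pairs out) := by unfold Spec_normalize_category_pairs; infer_instance

-- ===== CLAIM (what is proved, stated in full; the proofs are below) =====
def Claim_equal_normalize_category_pairs : Prop := ∀ (raw_pairs : List (String × Option String)), Dom_normalize_category_pairs raw_pairs → Spec_normalize_category_pairs raw_pairs (normalize_category_pairs raw_pairs)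

-- ===== LEMMAS AND PROOFS =====

-- The flat keys one item contributes.
def pvKeysOf (item : String × Option String) : List (String × Option String) :=
  if item.1 = "" then []
  else
    let subs := pvParseSubs item.2
    if subs ≠ [] then subs.map (fun s => (item.1, some s))
    else [(item.1, none)]

-- A's inner dedup step, on a diagonal state, is Set.add on both components.
theorem pvInnerA (c : String) (subs : List String)
    (s : PySem.Set (String × Option String)) :
    subs.foldl (fun (st : List (String × Option String) × PySem.Set (String × Option String)) sub =>
        if (c, some sub) ∈ st.2 then st
        else (st.1 ++ [(c, some sub)], PySem.Set.add st.2 (c, some sub)))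
      (s, s)
    = ((subs.map (fun sub => (c, some sub))).foldl PySem.Set.add s,
       (subs.map (fun sub => (c, some sub))).foldl PySem.Set.add s) := by
  induction subs generalizing s with
  | nil => simp
  | cons x xs ih =>
      simp only [List.foldl_cons, List.map_cons]
      by_cases h : (c, some x) ∈ s
      · simpa [h, PySem.Set.add, PySem.Set.contains] using ih s
      · rw [if_neg h]
        have hadd : PySem.Set.add s (c, some x) = s ++ [(c, some x)] := by
          simp [PySem.Set.add, PySem.Set.contains, h]
        rw [hadd]
        exact ih (s ++ [(c, some x)])

-- A's outer step on a diagonal state folds Set.add over the item's keys, on both components.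
theorem pvStepA (item : String × Option String) (s : PySem.Set (String × Option String)) :
    (fun (st : List (String × Option String) × PySem.Set (String × Option String)) item =>
      if item.1 = "" then st
      else if pvParseSubs item.2 ≠ [] then
        (pvParseSubs item.2).foldl (fun st sub =>
          if PySem.Set.contains st.2 (item.1, some sub) then st
          else (st.1 ++ [(item.1, some sub)], PySem.Set.add st.2 (item.1, some sub))) st
      else
        if PySem.Set.contains st.2 (item.1, none) then st
        else (st.1 ++ [(item.1, none)], PySem.Set.add st.2 (item.1, none))) (s, s) item
    = ((pvKeysOf item).foldl PySem.Set.add s, (pvKeysOf item).foldl PySem.Set.add s) := by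
  by_cases h1 : item.1 = ""
  · simp [pvKeysOf, h1]
  · by_cases h2 : pvParseSubs item.2 = []
    · by_cases h3 : (item.1, (none : Option String)) ∈ s
      · simp [pvKeysOf, h1, h2, h3, PySem.Set.add, PySem.Set.contains]
      · simp [pvKeysOf, h1, h2, h3, PySem.Set.add, PySem.Set.contains]
    · simp only [pvKeysOf, h1, h2, ne_eq, not_false_eq_true, if_pos, PySem.Set.contains]
      simpa using pvInnerA item.1 (pvParseSubs item.2) s

-- Folding A's step from a diagonal state keeps the diagonal and folds Set.add over the flat keys.
theorem pvFoldA (raw : List (String × Option String)) (s : PySem.Set (String × Option String)) :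
    raw.foldl
      (fun (st : List (String × Option String) × PySem.Set (String × Option String)) item =>
        if item.1 = "" then st
        else if pvParseSubs item.2 ≠ [] then
          (pvParseSubs item.2).foldl (fun st sub =>
            if PySem.Set.contains st.2 (item.1, some sub) then st
            else (st.1 ++ [(item.1, some sub)], PySem.Set.add st.2 (item.1, some sub))) st
        else
          if PySem.Set.contains st.2 (item.1, none) then st
          else (st.1 ++ [(item.1, none)], PySem.Set.add st.2 (item.1, none))) (s, s)
    = ((raw.flatMap pvKeysOf).foldl PySem.Set.add s, (raw.flatMap pvKeysOf).foldl PySem.Set.add s) := by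
  induction raw generalizing s with
  | nil => simp
  | cons x xs ih =>
      simp only [List.foldl_cons, List.flatMap_cons, List.foldl_append]
      have h := pvStepA x s
      simp only [] at h
      rw [h]
      exact ih _

-- B's generation pass produces exactly the flat keys.
theorem pvGenB (raw : List (String × Option String)) (acc : List (String × Option String)) :
    raw.foldl
      (fun (acc : List (String × Option String)) item =>
        if item.1 = "" then acc
        else if pvParseSubs item.2 ≠ [] then acc ++ (pvParseSubs item.2).map (fun s => (item.1, some s))
        else acc ++ [(item.1, none)]) acc
    = acc ++ raw.flatMap pvKeysOf := by
  induction raw generalizing acc with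
  | nil => simp
  | cons x xs ih =>
      simp only [List.foldl_cons, List.flatMap_cons]
      rw [ih]
      have hstep : (if x.1 = "" then acc
          else if pvParseSubs x.2 ≠ [] then acc ++ (pvParseSubs x.2).map (fun s => (x.1, some s))
          else acc ++ [(x.1, none)]) = acc ++ pvKeysOf x := by
        unfold pvKeysOf
        by_cases h1 : x.1 = ""
        · simp [h1]
        · by_cases h2 : pvParseSubs x.2 = [] <;> simp [h1, h2]
      rw [hstep, List.append_assoc]

-- ===== VERDICT (by name: the statement is the Claim_ definition above) =====
theorem normalize_category_pairs_spec : Claim_equal_normalize_category_pairs := by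
  intro raw _
  unfold Spec_normalize_category_pairs
  show normalize_category_pairs raw = normalize_category_pairs_alt raw
  have hB : normalize_category_pairs_alt raw = PySem.List.dedup (raw.flatMap pvKeysOf) := by
    show PySem.List.dedup _ = _
    congr 1
    exact (pvGenB raw []).trans (List.nil_append _)
  have hA : normalize_category_pairs raw = (raw.flatMap pvKeysOf).foldl PySem.Set.add [] :=
    congrArg Prod.fst (pvFoldA raw PySem.Set.empty)
  rw [hA, hB, PySem.List.dedup_eq_ofList, PySem.Set.ofList_eq_foldl]
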